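-- pv_equiv track=rewrite | github.com/brunobrsr1/mnk-game | projeto1_final.py | obtem_linha
-- ===== SOURCE A (Python) =====
-- def obtem_linha(tab, posicao):
--     """
--     Devolve um tuplo com todas as posições que se encontram na mesma linha que a posição indicada
--
--     Args:
--     - tab: Tabuleiro a verificar
--     - posicao: Posição do tabuleiro
--     """
--     # Declaração do tuplo da linha a ser obtida e variável auxiliar
--     linha = ()
--     i = 0
--
--     # Atualizar a posição para o primeiro elemento da linha
--     while (posicao - 1) % len(tab[0]) != 0:
--         posicao -= 1
--
--     # Ciclo para atualizar o tuplo da linha até ter todas as posições da linha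
--     while i != len(tab[0]):
--         linha += (posicao, )
--         posicao += 1
--         i += 1
--
--     return linha
-- ===== SOURCE B (Python) =====
-- def obtem_linha(tab, posicao):
--     """Closed form: row start via modulo, then the row as a range."""
--     largura = len(tab[0])
--     inicio = posicao - (posicao - 1) % largura
--     return tuple(range(inicio, inicio + largura))
-- ===== Notes on version B (the rewrite author's own statement) =====
-- stated objective: simpler
-- what changed: Replaces A's backward decrement-scan loop and element-by-element tuple accumulation with a closed-form modulo computation of the row start and a single range-to-tuple build.
import Mathlib
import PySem

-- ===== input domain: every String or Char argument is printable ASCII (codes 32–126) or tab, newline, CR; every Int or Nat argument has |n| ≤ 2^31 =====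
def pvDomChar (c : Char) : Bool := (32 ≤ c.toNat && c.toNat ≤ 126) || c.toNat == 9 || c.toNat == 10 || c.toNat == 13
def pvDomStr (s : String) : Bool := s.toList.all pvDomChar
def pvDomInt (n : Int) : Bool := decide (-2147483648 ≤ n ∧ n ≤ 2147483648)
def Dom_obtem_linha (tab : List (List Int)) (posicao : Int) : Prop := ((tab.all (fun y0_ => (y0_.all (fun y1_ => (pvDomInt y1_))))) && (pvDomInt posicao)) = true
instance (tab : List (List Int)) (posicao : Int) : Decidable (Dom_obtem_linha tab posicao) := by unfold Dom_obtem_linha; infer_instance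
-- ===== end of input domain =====

-- B replaces A's backward decrement scan and tuple accumulation by a closed-form
-- modulo row start and a single range build (objective: simpler).


-- used by scanBack's decreasing_by (must precede the port)
theorem emod_pred_of_ne_zero (w p : Int) (hw : 0 < w) (h : (p - 1) % w ≠ 0) :
    (p - 1 - 1) % w = (p - 1) % w - 1 := by
  have hm0 := Int.emod_nonneg (p - 1) (ne_of_gt hw)
  have hmw := Int.emod_lt_of_pos (p - 1) hw
  have hq := Int.emod_add_ediv (p - 1) w
  have hp : p - 1 - 1 = ((p - 1) % w - 1) + w * ((p - 1) / w) := by omega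
  rw [hp, Int.add_mul_emod_self_left]
  exact Int.emod_eq_of_lt (by omega) (by omega)

-- ===== PORT A =====
-- the 'while (posicao - 1) % len(tab[0]) != 0: posicao -= 1' loop
def scanBack (w : Int) (posicao : Int) : Int :=
  if hw : 0 < w then
    if h : PySem.Int.mod (posicao - 1) w = 0 then posicao
    else scanBack w (posicao - 1)
  else posicao  -- w ≤ 0: Python raised at len(tab[0]) == 0 already; excluded by Pre_
termination_by ((posicao - 1) % w).toNat
decreasing_by
  rw [PySem.Int.mod_eq_emod_of_pos hw] at h
  have := emod_pred_of_ne_zero w posicao hw h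
  have h0 := Int.emod_nonneg (posicao - 1) (ne_of_gt hw)
  omega

-- the 'while i != len(tab[0]): linha += (posicao,); posicao += 1; i += 1' loop
def buildRow (w : Int) (posicao : Int) (i : Int) (linha : List Int) : List Int :=
  if i = w then linha
  else if _h : i < w then buildRow w (posicao + 1) (i + 1) (linha ++ [posicao])
  else linha  -- unreachable from i = 0 with 0 ≤ w (Python would loop forever)
termination_by (w - i).toNat
decreasing_by omega

def obtem_linha (tab : List (List Int)) (posicao : Int) : List Int :=
  match PySem.List.pyGet? tab 0 with
  | none => []          -- IndexError: excluded by Pre_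
  | some r =>
    let w : Int := (r.length : Int)
    if w = 0 then []    -- ZeroDivisionError in '%': excluded by Pre_
    else buildRow w (scanBack w posicao) 0 []

-- ===== PORT B =====
def obtem_linha_alt (tab : List (List Int)) (posicao : Int) : List Int :=
  match PySem.List.pyGet? tab 0 with
  | none => []          -- IndexError: excluded by Pre_
  | some r =>
    let w : Int := (r.length : Int)
    if w = 0 then []    -- ZeroDivisionError in '%': excluded by Pre_
    else
      let inicio := posicao - PySem.Int.mod (posicao - 1) w
      List.map (fun k : Nat => inicio + (k : Int)) (List.range r.length)

-- ===== PRECONDITION & SPEC =====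
-- Pre_ excludes exactly the raising inputs: empty tab (IndexError on tab[0]) and
-- empty first row (ZeroDivisionError on '% len(tab[0])', resp. infinite loop avoidance).
def Pre_obtem_linha (tab : List (List Int)) (posicao : Int) : Prop :=
  tab ≠ [] ∧ tab.headD [] ≠ []
instance (tab : List (List Int)) (posicao : Int) : Decidable (Pre_obtem_linha tab posicao) := by unfold Pre_obtem_linha; infer_instance
def pvWitness_obtem_linha : List (List Int) × Int := ([[1, 2, 3], [4, 5, 6]], 5)

def Spec_obtem_linha (tab : List (List Int)) (posicao : Int) (out : List Int) : Prop := out = obtem_linha_alt tab posicao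
instance (tab : List (List Int)) (posicao : Int) (out : List Int) : Decidable (Spec_obtem_linha tab posicao out) := by unfold Spec_obtem_linha; infer_instance

-- ===== CLAIM (what is proved, stated in full; the proofs are below) =====
def Claim_equal_obtem_linha : Prop := ∀ (tab : List (List Int)) (posicao : Int), Dom_obtem_linha tab posicao → Pre_obtem_linha tab posicao → Spec_obtem_linha tab posicao (obtem_linha tab posicao)

-- ===== LEMMAS AND PROOFS =====

theorem scanBack_eq (w p : Int) (hw : 0 < w) : scanBack w p = p - (p - 1) % w := by
  fun_induction scanBack w p
  case case1 hw' h =>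
      rw [PySem.Int.mod_eq_emod_of_pos hw'] at h
      omega
  case case2 p hw' h ih =>
      rw [PySem.Int.mod_eq_emod_of_pos hw'] at h
      rw [ih, emod_pred_of_ne_zero w p hw' h]; ring
  case case3 hw' => omega

theorem buildRow_eq (n : Nat) : ∀ (w p i : Int) (linha : List Int), i + (n : Int) = w →
    buildRow w p i linha = linha ++ List.map (fun k : Nat => p + (k : Int)) (List.range n) := by
  induction n with
  | zero => intro w p i linha h; rw [buildRow]; simp; omega
  | succ m ih =>
      intro w p i linha h
      rw [buildRow]
      have hne : i ≠ w := by omega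
      have hlt : i < w := by omega
      simp only [hne, if_false, hlt, dif_pos]
      rw [ih w (p + 1) (i + 1) (linha ++ [p]) (by omega)]
      rw [List.range_succ_eq_map, List.map_cons, List.map_map, List.append_assoc]
      congr 1
      rw [List.singleton_append]
      congr 1
      · push_cast; ring
      · apply List.map_congr_left; intro k _; simp [Function.comp]; push_cast; ring

-- ===== VERDICT =====
theorem obtem_linha_spec : Claim_equal_obtem_linha := by
  intro tab posicao _ hpre
  obtain ⟨htab, hrow⟩ := hpre
  obtain ⟨r, rest, rfl⟩ : ∃ r rest, tab = r :: rest := by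
    cases tab with
    | nil => exact absurd rfl htab
    | cons r rest => exact ⟨r, rest, rfl⟩
  have hr : r ≠ [] := by simpa using hrow
  have hw : 0 < (r.length : Int) := by
    have : 0 < r.length := List.length_pos_iff.mpr hr
    exact_mod_cast this
  unfold Spec_obtem_linha obtem_linha obtem_linha_alt
  rw [PySem.List.pyGet?_zero_cons]
  simp only [ne_of_gt hw]
  rw [scanBack_eq _ _ hw, buildRow_eq r.length _ _ 0 [] (by omega)]
  rw [PySem.Int.mod_eq_emod_of_pos hw]
  simp
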